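-- pv_equiv track=rewrite | github.com/dorienh/MERP | processing/pruning.py | check_for_plateau
-- ===== SOURCE A (Python) =====
-- def check_for_plateau(temp, timestep_threshold=1200):
--
--     if all(e == temp[0] for e in temp):
--         return True # stagnant throughout.
--
--     assert type(timestep_threshold) == int, 'timestep_threshold entered must be an integer!'
--     for i in range(len(temp)-timestep_threshold):
--         curr = temp[i]
--         if all(e == curr for e in temp[i:i+timestep_threshold]) == True:
--             return True
--     return False
-- ===== SOURCE B (Python) =====
-- def check_for_plateau(temp, timestep_threshold=1200):
--     # Single-pass run-length scan: True iff some constant run reaches the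
--     # threshold length, or the whole series is constant (incl. empty),
--     # or the threshold is non-positive (a trivial plateau always exists).
--     assert type(timestep_threshold) == int, 'timestep_threshold entered must be an integer!'
--     if timestep_threshold <= 0 or not temp:
--         return True
--     run = 1
--     prev = temp[0]
--     for x in temp[1:]:
--         run = run + 1 if x == prev else 1
--         if run >= timestep_threshold:
--             return True
--         prev = x
--     return run == len(temp)
-- ===== Notes on version B (the rewrite author's own statement) =====
-- stated objective: faster
-- what changed: Replaced the nested scan (for each start index, re-check a whole threshold-length window) by a single-pass run-length counter that flags any constant run reaching the threshold; this also fixes A's off-by-one loop bound range(len(temp)-threshold), which misses a plateau of exactly threshold length sitting at the very end of the series.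
-- intended difference: On non-constant series whose final threshold-length window is constant while no earlier window is, A returns False (its loop stops one start index short of len-threshold) and B returns True; a plateau of the required length is present, so True is the intended value. — e.g. on check_for_plateau([1, 2, 2], 2): A returns false, B returns true
import Mathlib
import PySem

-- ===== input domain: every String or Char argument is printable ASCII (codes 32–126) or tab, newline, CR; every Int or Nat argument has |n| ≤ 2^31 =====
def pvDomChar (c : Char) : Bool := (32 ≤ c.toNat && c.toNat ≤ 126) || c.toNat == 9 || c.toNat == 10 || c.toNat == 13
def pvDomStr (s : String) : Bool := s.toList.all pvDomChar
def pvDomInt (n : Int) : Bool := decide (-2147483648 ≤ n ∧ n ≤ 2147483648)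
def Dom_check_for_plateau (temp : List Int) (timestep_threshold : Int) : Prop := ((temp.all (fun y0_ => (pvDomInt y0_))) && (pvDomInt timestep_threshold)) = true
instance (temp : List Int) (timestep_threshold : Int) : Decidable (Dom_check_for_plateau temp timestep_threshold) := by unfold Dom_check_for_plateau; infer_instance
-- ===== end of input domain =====

-- B replaces A's per-start-index window re-scan (O(n·threshold)) by one run-length pass (O(n)),
-- and fixes A's off-by-one loop bound, which misses a threshold-length plateau at the very end.

-- ===== PORT A =====
-- the for-loop over range(len(temp)-timestep_threshold); the `none` branch is where
-- Python's temp[i] would raise IndexError (never reached: A is total, see the proofs)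
def pvALoop (temp : List Int) (th : Int) : Nat → Int → Bool
  | 0, _ => false
  | n + 1, i =>
    match PySem.List.pyGet? temp i with
    | none => false
    | some curr =>
      if (PySem.List.slice temp (some i) (some (i + th))).all (fun e => e == curr) then true
      else pvALoop temp th n (i + 1)

def check_for_plateau (temp : List Int) (timestep_threshold : Int) : Bool :=
  -- all(e == temp[0] for e in temp): lazy, so the empty list gives True without indexing
  if temp.all (fun e => PySem.List.pyGet? temp 0 == some e) then true
  else pvALoop temp timestep_threshold ((temp.length : Int) - timestep_threshold).toNat 0

-- ===== PORT B =====
-- the run-length loop of Source B: prev = previous element, run = current trailing run length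
def pvBGo (th n : Int) : Int → Int → List Int → Bool
  | _, run, [] => run == n
  | prev, run, x :: xs =>
    let run' := if x == prev then run + 1 else 1
    if th ≤ run' then true else pvBGo th n x run' xs

def check_for_plateau_alt (temp : List Int) (timestep_threshold : Int) : Bool :=
  if timestep_threshold ≤ 0 then true
  else match temp with
    | [] => true
    | x :: xs => pvBGo timestep_threshold (temp.length : Int) x 1 xs

-- ===== PRECONDITION & SPEC =====
-- window test used by D_: the (at most) t elements of temp starting at index i are all equal
def pvWinB (temp : List Int) (t : Nat) (i : Nat) : Bool :=
  ((temp.drop i).take t).all (· == temp.getD i 0)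

-- On non-constant series whose final threshold-length window is constant while no earlier
-- window is, A returns False (its loop stops one start index short of len-threshold) and
-- B returns True; a plateau of the required length is present, so True is the intended value.
def D_check_for_plateau (temp : List Int) (timestep_threshold : Int) : Prop :=
  1 ≤ timestep_threshold ∧ timestep_threshold < temp.length ∧
  ∀ i ≤ temp.length - timestep_threshold.toNat,
    pvWinB temp timestep_threshold.toNat i = decide (i = temp.length - timestep_threshold.toNat)

instance (temp : List Int) (timestep_threshold : Int) : Decidable (D_check_for_plateau temp timestep_threshold) := by
  unfold D_check_for_plateau; infer_instance

def Spec_check_for_plateau (temp : List Int) (timestep_threshold : Int) (out : Bool) : Prop :=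
  ¬ D_check_for_plateau temp timestep_threshold → out = check_for_plateau_alt temp timestep_threshold
instance (temp : List Int) (timestep_threshold : Int) (out : Bool) : Decidable (Spec_check_for_plateau temp timestep_threshold out) := by
  unfold Spec_check_for_plateau; infer_instance

def pvDiffWitness_check_for_plateau : List Int × Int := ([1, 2, 2], 2)
def pvDiffWitnessOut_check_for_plateau : Bool × Bool := (false, true)

-- ===== CLAIM (what is proved, stated in full; the proofs are below) =====
def Claim_unchanged_check_for_plateau : Prop := ∀ (temp : List Int) (timestep_threshold : Int), Dom_check_for_plateau temp timestep_threshold → Spec_check_for_plateau temp timestep_threshold (check_for_plateau temp timestep_threshold)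
def Claim_changed_check_for_plateau : Prop := Dom_check_for_plateau (pvDiffWitness_check_for_plateau.1) (pvDiffWitness_check_for_plateau.2) ∧ D_check_for_plateau (pvDiffWitness_check_for_plateau.1) (pvDiffWitness_check_for_plateau.2) ∧ check_for_plateau (pvDiffWitness_check_for_plateau.1) (pvDiffWitness_check_for_plateau.2) = pvDiffWitnessOut_check_for_plateau.1 ∧ check_for_plateau_alt (pvDiffWitness_check_for_plateau.1) (pvDiffWitness_check_for_plateau.2) = pvDiffWitnessOut_check_for_plateau.2 ∧ pvDiffWitnessOut_check_for_plateau.1 ≠ pvDiffWitnessOut_check_for_plateau.2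
def Claim_exact_check_for_plateau : Prop := ∀ (temp : List Int) (timestep_threshold : Int), Dom_check_for_plateau temp timestep_threshold → D_check_for_plateau temp timestep_threshold → check_for_plateau temp timestep_threshold ≠ check_for_plateau_alt temp timestep_threshold

-- ===== LEMMAS AND PROOFS =====

-- A's first branch tests exactly "temp is constant"
theorem pvConst_iff (temp : List Int) :
    (temp.all (fun e => PySem.List.pyGet? temp 0 == some e) = true) ↔ (∀ e ∈ temp, e = temp.getD 0 0) := by
  cases temp with
  | nil => simp
  | cons x xs =>
    have hget : PySem.List.pyGet? (x :: xs) 0 = some x := by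
      simp [PySem.List.pyGet?, PySem.List.pyIdx?]
    rw [List.all_eq_true]
    constructor
    · intro h e he
      have h2 := h e he
      rw [hget, beq_iff_eq, Option.some_inj] at h2
      exact h2.symm
    · intro h e he
      have hx : e = x := h e he
      rw [hget, hx]
      simp

theorem pvNonconst_len (temp : List Int) (h : ¬ (∀ e ∈ temp, e = temp.getD 0 0)) :
    2 ≤ temp.length := by
  match temp with
  | [] => simp at h
  | [x] => simp at h
  | x :: y :: xs => simp

-- pointwise characterisation of the window test
theorem pvWinB_iff (temp : List Int) (t i : Nat) :
    pvWinB temp t i = true ↔ ∀ k, i ≤ k → k < i + t → k < temp.length → temp.getD k 0 = temp.getD i 0 := by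
  unfold pvWinB
  rw [List.all_eq_true]
  constructor
  · intro h k hik hkt hkl
    have hk' : k - i < ((temp.drop i).take t).length := by
      simp [List.length_take, List.length_drop]; omega
    have hmem : ((temp.drop i).take t)[k - i] ∈ (temp.drop i).take t := List.getElem_mem hk'
    have := h _ hmem
    have hget : ((temp.drop i).take t)[k - i] = temp[k]'(by omega) := by
      rw [List.getElem_take, List.getElem_drop]
      congr 1; omega
    rw [hget] at this
    have h3 : temp[k]'(by omega) = temp.getD i 0 := by simpa using this
    have h4 : temp.getD k 0 = temp[k]'(by omega) := List.getD_eq_getElem _ _ (by omega)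
    rw [h4, h3]
  · intro h e he
    rw [List.mem_iff_getElem] at he
    obtain ⟨k, hk, hek⟩ := he
    have hkl : k < min t (temp.length - i) := by
      simpa [List.length_take, List.length_drop] using hk
    have hget : ((temp.drop i).take t)[k]'hk = temp[i + k]'(by omega) := by
      rw [List.getElem_take, List.getElem_drop]
    have := h (i + k) (by omega) (by omega) (by omega)
    rw [List.getD_eq_getElem _ _ (by omega)] at this
    rw [← hek, hget, this]
    simp

-- a constant list makes every window test succeed at index 0
theorem pvConst_win (temp : List Int) (t : Nat) (hc : ∀ e ∈ temp, e = temp.getD 0 0) :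
    pvWinB temp t 0 = true := by
  rw [pvWinB_iff]
  intro k _ _ hk3
  have h := hc (temp[k]'hk3) (List.getElem_mem _)
  rw [List.getD_eq_getElem _ _ hk3]
  exact h

-- a window test at 0 covering the whole list means the list is constant
theorem pvWin_full (temp : List Int) (t : Nat) (h : temp.length ≤ t)
    (hw : pvWinB temp t 0 = true) : ∀ e ∈ temp, e = temp.getD 0 0 := by
  intro e he
  rw [List.mem_iff_getElem] at he
  obtain ⟨k, hk, hek⟩ := he
  have h2 := (pvWinB_iff temp t 0).mp hw k (by omega) (by omega) hk
  rw [List.getD_eq_getElem _ _ hk] at h2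
  rw [← hek]
  exact h2

-- if temp is constant, B's loop accepts
theorem pvBGo_const (th n : Int) (x : Int) :
    ∀ (xs : List Int) (run : Int), (∀ y ∈ xs, y = x) → run + xs.length = n →
      pvBGo th n x run xs = true := by
  intro xs
  induction xs with
  | nil => intro run _ hn; simp at hn; simp [pvBGo, hn]
  | cons y ys ih =>
    intro run hall hn
    have hy : y = x := hall y (by simp)
    subst hy
    simp only [pvBGo, beq_self_eq_true, if_true]
    split
    · rfl
    · exact ih (run + 1) (fun z hz => hall z (by simp [hz])) (by simp at hn ⊢; omega)

-- proof-side list form of A's loop, and the bridge from the fuel/index form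
def pvALoopL (temp : List Int) (th : Int) : List Int → Bool
  | [] => false
  | i :: rest =>
    match PySem.List.pyGet? temp i with
    | none => false
    | some curr =>
      if (PySem.List.slice temp (some i) (some (i + th))).all (fun e => e == curr) then true
      else pvALoopL temp th rest

theorem pvALoop_eq (temp : List Int) (th : Int) :
    ∀ (n : Nat) (i : Int), pvALoop temp th n i = pvALoopL temp th (PySem.List.pyRange i (i + n) 1) := by
  intro n
  induction n with
  | zero =>
    intro i
    rw [PySem.List.pyRange_one_eq_nil (by omega)]
    rfl
  | succ n ih =>
    intro i
    rw [PySem.List.pyRange_one_cons (by push_cast; omega)]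
    show pvALoop temp th (n + 1) i = _
    simp only [pvALoop, pvALoopL]
    cases PySem.List.pyGet? temp i with
    | none => rfl
    | some curr =>
      simp only []
      split
      · rfl
      · rw [ih (i + 1)]
        rw [show i + ((n + 1 : Nat) : Int) = i + 1 + (n : Int) by push_cast; ring]

theorem pvRange_toNat (b : Int) :
    PySem.List.pyRange 0 (0 + ((b.toNat : Nat) : Int)) 1 = PySem.List.pyRange 0 b 1 := by
  by_cases h : 0 ≤ b
  · congr 1
    omega
  · rw [PySem.List.pyRange_one_eq_nil (by omega), PySem.List.pyRange_one_eq_nil (by omega)]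

-- helper for showing A's loop accepts at a given index i₀
theorem pvALoopL_true (temp : List Int) (th : Int) (i₀ : Int)
    (hi : (PySem.List.pyGet? temp i₀).isSome)
    (hw : ∀ curr, PySem.List.pyGet? temp i₀ = some curr →
      (PySem.List.slice temp (some i₀) (some (i₀ + th))).all (fun e => e == curr) = true) :
    ∀ pre post, (∀ j ∈ pre, (PySem.List.pyGet? temp j).isSome) →
      pvALoopL temp th (pre ++ i₀ :: post) = true := by
  intro pre
  induction pre with
  | nil =>
    intro post _
    obtain ⟨curr, hc⟩ := Option.isSome_iff_exists.mp hi
    simp only [List.nil_append, pvALoopL, hc, hw curr hc, if_true]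
  | cons j pre ih =>
    intro post hpre
    have hj := hpre j (by simp)
    obtain ⟨c, hc⟩ := Option.isSome_iff_exists.mp hj
    simp only [List.cons_append, pvALoopL, hc]
    split
    · rfl
    · exact ih post (fun k hk => hpre k (by simp [hk]))

-- A's loop over a list of valid indices is an `any` of window tests
theorem pvALoopL_any (temp : List Int) (th : Int) (ht : 1 ≤ th) :
    ∀ l : List Int, (∀ j ∈ l, 0 ≤ j ∧ j < (temp.length : Int)) →
      pvALoopL temp th l = l.any (fun j => pvWinB temp th.toNat j.toNat) := by
  intro l
  induction l with
  | nil => intro _; simp [pvALoopL]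
  | cons j rest ih =>
    intro h
    obtain ⟨hj0, hjl⟩ := h j (by simp)
    have hget : PySem.List.pyGet? temp j = some (temp[j.toNat]'(by omega)) := by
      have := PySem.List.pyGet?_natCast (xs := temp) (n := j.toNat)
      rw [Int.toNat_of_nonneg hj0] at this
      rw [this, List.getElem?_eq_getElem (by omega)]
    have hslice : PySem.List.slice temp (some j) (some (j + th)) = (temp.drop j.toNat).take th.toNat := by
      rw [PySem.List.slice_toNat temp hj0 (by omega)]
      congr 1
      omega
    have hcurr : temp[j.toNat]'(by omega) = temp.getD j.toNat 0 :=
      (List.getD_eq_getElem _ _ (by omega)).symm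
    simp only [pvALoopL, hget, List.any_cons]
    rw [hslice, hcurr]
    split
    · rename_i hwin
      have hW : pvWinB temp th.toNat j.toNat = true := hwin
      simp [hW]
    · rename_i hwin
      have : pvWinB temp th.toNat j.toNat = false := by
        simp only [pvWinB]
        exact Bool.eq_false_iff.mpr (fun hc => hwin hc)
      rw [this, ih (fun k hk => h k (by simp [hk]))]
      simp

-- B's loop invariant: pvBGo accepts iff temp is constant or some full window
-- starting at or after the current run's start is constant
theorem pvBGo_spec (temp : List Int) (th : Int) (ht : 2 ≤ th) :
    ∀ (xs : List Int) (j r : Nat), temp.drop j = xs → 1 ≤ r → r ≤ j → j ≤ temp.length →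
      (r : Int) < th →
      (∀ k, j - r ≤ k → k < j → temp.getD k 0 = temp.getD (j-1) 0) →
      (r = j ∨ temp.getD (j - r - 1) 0 ≠ temp.getD (j-1) 0) →
      (pvBGo th (temp.length : Int) (temp.getD (j-1) 0) r xs = true ↔
        ((∀ e ∈ temp, e = temp.getD 0 0) ∨
         ∃ i, j - r ≤ i ∧ i + th.toNat ≤ temp.length ∧ pvWinB temp th.toNat i = true)) := by
  intro xs
  induction xs with
  | nil =>
    intro j r hdrop hr1 hrj hjl hrth hrun hmax
    have hj : j = temp.length := by
      have := List.drop_eq_nil_iff.mp hdrop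
      omega
    subst hj
    constructor
    · intro h
      simp only [pvBGo, beq_iff_eq] at h
      have hr : r = temp.length := by exact_mod_cast h
      left
      intro e he
      rw [List.mem_iff_getElem] at he
      obtain ⟨k, hk, hek⟩ := he
      subst hek
      rcases Nat.eq_zero_or_pos temp.length with h0 | h0
      · omega
      · have h1 := hrun k (by omega) (by omega)
        have h2 := hrun 0 (by omega) (by omega)
        rw [List.getD_eq_getElem _ _ hk] at h1
        rw [h1, ← h2]
    · rintro (hconst | ⟨i, hi1, hi2, hi3⟩)
      · -- constant forces r = temp.length by maximality
        have hr : r = temp.length := by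
          rcases hmax with h | h
          · exact h
          · exfalso
            apply h
            have e1 := hconst (temp[temp.length - r - 1]'(by omega)) (List.getElem_mem _)
            have e2 := hconst (temp[temp.length - 1]'(by omega)) (List.getElem_mem _)
            rw [List.getD_eq_getElem _ _ (by omega), List.getD_eq_getElem _ _ (by omega)]
            rw [e1, e2]
        simp [pvBGo, hr]
      · -- impossible: window inside the trailing run needs th ≤ r < th
        exfalso
        have := hrth
        omega
  | cons x xs ih =>
    intro j r hdrop hr1 hrj hjl hrth hrun hmax
    have hjlen : j < temp.length := by
      by_contra h
      have : temp.drop j = [] := List.drop_eq_nil_iff.mpr (by omega)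
      rw [this] at hdrop; exact List.cons_ne_nil _ _ hdrop.symm
    have hx : x = temp[j]'hjlen := by
      have : temp.drop j = temp[j]'hjlen :: temp.drop (j+1) :=
        List.drop_eq_getElem_cons hjlen
      rw [this] at hdrop
      exact (List.cons.injEq .. ▸ hdrop.symm).1
    have hdrop' : temp.drop (j+1) = xs := by
      have : temp.drop j = temp[j]'hjlen :: temp.drop (j+1) :=
        List.drop_eq_getElem_cons hjlen
      rw [this] at hdrop
      exact (List.cons.injEq .. ▸ hdrop.symm).2.symm
    have hgj : temp.getD j 0 = temp[j]'hjlen := List.getD_eq_getElem _ _ hjlen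
    by_cases heq : x = temp.getD (j-1) 0
    · -- run extends
      simp only [pvBGo, heq, beq_self_eq_true, if_true]
      by_cases hth : th ≤ (r : Int) + 1
      · -- run reaches threshold: accept, and window at j - r is constant
        have hrth' : (r : Int) + 1 = th := by omega
        simp only [hth, if_true, true_iff]
        right
        refine ⟨j - r, le_refl _, by omega, ?_⟩
        rw [pvWinB_iff]
        intro k hk1 hk2 hk3
        have hk2' : k ≤ j := by omega
        rcases Nat.lt_or_ge k j with hkj | hkj
        · rw [hrun k hk1 hkj, ← hrun (j - r) (by omega) (by omega)]
        · have hkj' : k = j := by omega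
          rw [hkj', hgj, ← hx, heq, ← hrun (j - r) (by omega) (by omega)]
      · -- recurse
        simp only [hth, if_false]
        have hprev : temp.getD j 0 = x := by rw [hgj, hx]
        have hrec := ih (j+1) (r+1) hdrop' (by omega) (by omega) (by omega) (by push_cast; omega)
          (by
            intro k hk1 hk2
            simp only [Nat.add_sub_cancel]
            rcases Nat.lt_or_ge k j with hkj | hkj
            · rw [hrun k (by omega) hkj, ← heq, ← hprev]
            · have : k = j := by omega
              subst this; rfl)
          (by
            simp only [Nat.add_sub_cancel]
            rcases hmax with h | h
            · left; omega
            · right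
              have hidx : j + 1 - (r + 1) - 1 = j - r - 1 := by omega
              rw [hidx, hprev, heq]
              exact h)
        simp only [Nat.add_sub_cancel] at hrec
        rw [show temp.getD j 0 = x from hprev] at hrec
        rw [heq] at hrec
        push_cast at hrec
        rw [hrec]
    · -- run resets to 1
      have hbeq : (x == temp.getD (j-1) 0) = false := by
        exact beq_eq_false_iff_ne.mpr heq
      have hth1 : ¬ th ≤ (1 : Int) := by omega
      have hprev : temp.getD j 0 = x := by rw [hgj, hx]
      have hstep : pvBGo th (temp.length : Int) (temp.getD (j-1) 0) (r : Int) (x :: xs)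
          = pvBGo th (temp.length : Int) x 1 xs := by
        simp only [pvBGo]
        rw [if_neg (show ¬ ((x == temp.getD (j-1) 0) = true) from fun hc => by rw [hbeq] at hc; exact Bool.false_ne_true hc)]
        rw [if_neg hth1]
      rw [hstep]
      have hrec := ih (j+1) 1 hdrop' (le_refl _) (by omega) (by omega) (by omega)
        (fun k hk1 hk2 => congrArg (fun m => temp.getD m 0) (by omega : k = j + 1 - 1))
        (by
          right
          have he2 : j + 1 - 1 = j := by omega
          rw [he2, hprev]
          exact fun hc => heq hc.symm)
      simp only [Nat.add_sub_cancel, Nat.cast_one] at hrec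
      rw [hprev] at hrec
      rw [hrec]
      -- windows starting in [j - r, j) are broken by temp[j-1] ≠ temp[j]
      have hnowin : ∀ i, j - r ≤ i → i < j → i + th.toNat ≤ temp.length →
          pvWinB temp th.toNat i ≠ true := by
        intro i h1 h2 h3 hw
        rw [pvWinB_iff] at hw
        have hj1 : j - 1 < temp.length := by omega
        have e1 := hw (j-1) (by omega) (by omega) (by omega)
        have e2 := hw j (by omega) (by omega) (by omega)
        apply heq
        rw [hx, ← hgj, e2, ← e1]
      constructor
      · rintro (h | ⟨i, h1, h2, h3⟩)
        · exact Or.inl h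
        · exact Or.inr ⟨i, by omega, h2, h3⟩
      · rintro (h | ⟨i, h1, h2, h3⟩)
        · exact Or.inl h
        · rcases Nat.lt_or_ge i j with hij | hij
          · exact absurd h3 (hnowin i h1 hij h2)
          · exact Or.inr ⟨i, by omega, h2, h3⟩

theorem pvGet_eq (temp : List Int) (i : Int) (h0 : 0 ≤ i) (h1 : i < (temp.length : Int)) :
    PySem.List.pyGet? temp i = some (temp.getD i.toNat 0) := by
  have h2 : i.toNat < temp.length := by omega
  have h := PySem.List.pyGet?_natCast (xs := temp) (n := i.toNat)
  rw [Int.toNat_of_nonneg h0] at h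
  rw [h, List.getElem?_eq_getElem h2, List.getD_eq_getElem _ _ h2]

-- A for a non-constant list with positive threshold: `any` of the window tests
-- over start indices 0 … len-th-1 (A's loop bound)
theorem pvA_char (temp : List Int) (th : Int) (ht : 1 ≤ th)
    (hnc : ¬ (∀ e ∈ temp, e = temp.getD 0 0)) :
    check_for_plateau temp th =
      (List.range (temp.length - th.toNat)).any (pvWinB temp th.toNat) := by
  unfold check_for_plateau
  rw [if_neg (fun hc => hnc ((pvConst_iff temp).mp hc))]
  rw [pvALoop_eq, pvRange_toNat]
  rw [pvALoopL_any temp th ht _ (by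
    intro j hj
    rw [PySem.List.mem_pyRange_one] at hj
    constructor
    · exact hj.1
    · omega)]
  rw [PySem.List.pyRange_one, List.any_map]
  have hcast : ((temp.length : Int) - th - 0).toNat = temp.length - th.toNat := by omega
  rw [hcast]
  congr 1
  funext k
  simp

-- B for a non-constant list with threshold ≥ 2: accepts iff some full window is constant
theorem pvB_char (temp : List Int) (th : Int) (ht : 2 ≤ th)
    (hnc : ¬ (∀ e ∈ temp, e = temp.getD 0 0)) :
    (check_for_plateau_alt temp th = true ↔
      ∃ i, i + th.toNat ≤ temp.length ∧ pvWinB temp th.toNat i = true) := by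
  have hlen : 2 ≤ temp.length := pvNonconst_len temp hnc
  unfold check_for_plateau_alt
  rw [if_neg (by omega)]
  cases temp with
  | nil => simp at hlen
  | cons x xs =>
    have hspec := pvBGo_spec (x :: xs) th ht xs 1 1 rfl (le_refl _) (le_refl _)
      (by simp) (by omega)
      (fun k hk1 hk2 => congrArg (fun m => (x :: xs).getD m 0) (by omega : k = 1 - 1))
      (Or.inl rfl)
    simp only [show (1:Nat) - 1 = 0 from rfl, Nat.cast_one] at hspec
    have hgd : (x :: xs).getD 0 0 = x := rfl
    rw [hgd] at hspec
    show pvBGo th (((x :: xs).length : Nat) : Int) x 1 xs = true ↔ _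
    rw [hspec]
    constructor
    · rintro (h | ⟨i, _, h2, h3⟩)
      · exact absurd h hnc
      · exact ⟨i, h2, h3⟩
    · rintro ⟨i, h2, h3⟩
      exact Or.inr ⟨i, Nat.zero_le _, h2, h3⟩

-- ===== VERDICT (by name: the statement is the Claim_ definition above) =====
theorem check_for_plateau_spec : Claim_unchanged_check_for_plateau := by
  intro temp th _ hD
  show check_for_plateau temp th = check_for_plateau_alt temp th
  by_cases hconst : ∀ e ∈ temp, e = temp.getD 0 0
  · -- constant series: both return true
    have hA : check_for_plateau temp th = true := by
      unfold check_for_plateau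
      rw [if_pos ((pvConst_iff temp).mpr hconst)]
    have hB : check_for_plateau_alt temp th = true := by
      unfold check_for_plateau_alt
      by_cases h0 : th ≤ 0
      · rw [if_pos h0]
      · rw [if_neg h0]
        cases temp with
        | nil => rfl
        | cons x xs =>
          have hx : (x :: xs).getD 0 0 = x := rfl
          exact pvBGo_const th _ x xs 1
            (fun y hy => by rw [hconst y (by simp [hy]), hx])
            (by simp; omega)
    rw [hA, hB]
  · have hlen : 2 ≤ temp.length := pvNonconst_len temp hconst
    have hAif : ¬ (temp.all (fun e => PySem.List.pyGet? temp 0 == some e) = true) :=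
      fun hc => hconst ((pvConst_iff temp).mp hc)
    by_cases hpos : th ≤ 0
    · -- non-positive threshold: both true (A hits an empty slice)
      have hB : check_for_plateau_alt temp th = true := by
        unfold check_for_plateau_alt; rw [if_pos hpos]
      have hA : check_for_plateau temp th = true := by
        unfold check_for_plateau
        rw [if_neg hAif]
        rw [pvALoop_eq, pvRange_toNat]
        by_cases hsmall : (temp.length : Int) + th ≤ 0
        · -- i₀ = 0: slice temp[0:th] is already empty
          rw [PySem.List.pyRange_one_cons (by omega)]
          apply pvALoopL_true temp th 0
            (by rw [pvGet_eq temp 0 (le_refl _) (by omega)]; rfl)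
            (by
              intro curr _
              have hth : (0 : Int) + th = -(((-th).toNat : Nat) : Int) := by omega
              rw [hth, PySem.List.slice_zero_start,
                PySem.List.slice_to_neg_natCast temp ((-th).toNat) (by omega)]
              have h0 : temp.length - (-th).toNat = 0 := by omega
              rw [h0, List.take_zero]
              rfl)
            [] _ (by simp)
        · -- i₀ = -th: slice temp[-th:0] is empty
          rw [PySem.List.pyRange_one_append 0 (-th) ((temp.length : Int) - th)
            (by omega) (by omega),
            PySem.List.pyRange_one_cons (show -th < (temp.length : Int) - th by omega)]
          apply pvALoopL_true temp th (-th)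
            (by rw [pvGet_eq temp (-th) (by omega) (by omega)]; rfl)
            (by
              intro curr _
              have hth : -th + th = (0 : Int) := by ring
              rw [hth, PySem.List.slice_toNat temp (by omega) (le_refl 0)]
              simp)
            _ _ (by
              intro j hj
              rw [PySem.List.mem_pyRange_one] at hj
              rw [pvGet_eq temp j hj.1 (by omega)]; rfl)
      rw [hA, hB]
    · by_cases h1 : th = 1
      · -- threshold 1: both true (every single element is a window)
        subst h1
        have hA : check_for_plateau temp 1 = true := by
          rw [pvA_char temp 1 (le_refl _) hconst, List.any_eq_true]
          refine ⟨0, List.mem_range.mpr (by omega), ?_⟩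
          cases temp with
          | nil => simp at hlen
          | cons x xs => simp [pvWinB]
        have hB : check_for_plateau_alt temp 1 = true := by
          cases temp with
          | nil => simp at hlen
          | cons x xs =>
            cases xs with
            | nil => simp at hlen
            | cons y ys =>
              unfold check_for_plateau_alt
              rw [if_neg (by omega)]
              by_cases hxy : (y == x) = true <;>
                simp [pvBGo, hxy]
        rw [hA, hB]
      · -- threshold ≥ 2: the two `any`s agree outside D_
        have ht2 : 2 ≤ th := by omega
        rw [pvA_char temp th (by omega) hconst]
        by_cases hex : ∃ i, i < temp.length - th.toNat ∧ pvWinB temp th.toNat i = true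
        · obtain ⟨i, hi1, hi2⟩ := hex
          have hB : check_for_plateau_alt temp th = true :=
            (pvB_char temp th ht2 hconst).mpr ⟨i, by omega, hi2⟩
          rw [hB, List.any_eq_true]
          exact ⟨i, List.mem_range.mpr hi1, hi2⟩
        · push Not at hex
          have hnone : ∀ i < temp.length - th.toNat, pvWinB temp th.toNat i = false := by
            intro i hi
            exact Bool.eq_false_iff.mpr (fun hc => absurd hc (by
              intro hc; exact absurd (hex i hi) (by simp [hc])))
          have hB : check_for_plateau_alt temp th = false := by
            rw [Bool.eq_false_iff]
            intro hBtrue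
            obtain ⟨i, hi1, hi2⟩ := (pvB_char temp th ht2 hconst).mp hBtrue
            have hieq : i = temp.length - th.toNat := by
              rcases Nat.lt_or_ge i (temp.length - th.toNat) with h | h
              · exact absurd hi2 (by rw [hnone i h]; simp)
              · omega
            subst hieq
            have htl : th < (temp.length : Int) := by
              rcases Nat.lt_or_ge th.toNat temp.length with h | h
              · omega
              · exfalso
                have h0 : temp.length - th.toNat = 0 := by omega
                rw [h0] at hi2
                exact hconst (pvWin_full temp th.toNat h hi2)
            apply hD
            refine ⟨by omega, htl, ?_⟩
            intro i' _
            rcases Nat.lt_or_ge i' (temp.length - th.toNat) with h | h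
            · rw [hnone i' h]
              have hne : i' ≠ temp.length - th.toNat := by omega
              simp [hne]
            · have hieq' : i' = temp.length - th.toNat := by omega
              rw [hieq', hi2]
              simp
          rw [hB, List.any_eq_false]
          intro w hw
          rw [List.mem_range] at hw
          simp [hnone w hw]

theorem check_for_plateau_changed : Claim_changed_check_for_plateau := by
  unfold Claim_changed_check_for_plateau; decide

theorem check_for_plateau_tight : Claim_exact_check_for_plateau := by
  intro temp th _ hD
  obtain ⟨ht1, htl, hall⟩ := hD
  have hWend : pvWinB temp th.toNat (temp.length - th.toNat) = true := by
    have h := hall (temp.length - th.toNat) (le_refl _)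
    simpa using h
  have hnone : ∀ i < temp.length - th.toNat, pvWinB temp th.toNat i = false := by
    intro i hi
    have h := hall i (by omega)
    have hne : i ≠ temp.length - th.toNat := by omega
    simpa [hne] using h
  have hnc : ¬ (∀ e ∈ temp, e = temp.getD 0 0) := by
    intro hc
    have h0 : 0 < temp.length - th.toNat := by omega
    have h := hnone 0 h0
    rw [pvConst_win temp th.toNat hc] at h
    simp at h
  have hlen : 2 ≤ temp.length := pvNonconst_len temp hnc
  by_cases h1 : th = 1
  · -- impossible: with threshold 1 the first window is already constant
    exfalso
    subst h1
    have h0 := hnone 0 (by omega)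
    cases temp with
    | nil => simp at hlen
    | cons x xs => simp [pvWinB] at h0
  · have ht2 : 2 ≤ th := by omega
    have hA : check_for_plateau temp th = false := by
      rw [pvA_char temp th (by omega) hnc, List.any_eq_false]
      intro w hw
      rw [List.mem_range] at hw
      simp [hnone w hw]
    have hB : check_for_plateau_alt temp th = true :=
      (pvB_char temp th ht2 hnc).mpr ⟨temp.length - th.toNat, by omega, hWend⟩
    rw [hA, hB]
    simp
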